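-- pv_equiv track=rewrite | github.com/androidAppGuard/SQDroid | bin/run_result_script.py | getFinalResult
-- ===== SOURCE A (Python) =====
-- def getFinalResult(monkey_result, sapienz_result, stoat_result, SQtesting_result, SQtesting2_result):
--     final_result = {}
--     for key in monkey_result.keys():
--         if key in final_result.keys():
--             continue
--         else:
--             if key in sapienz_result.keys():
--                 final_value = monkey_result[key] + "@" + sapienz_result[key]
--             else:
--                 final_value = monkey_result[key] + "@ "
--             if key in stoat_result.keys():
--                 final_value = final_value + "@" + stoat_result[key]
--             else:
--                 final_value = final_value + "@ "
--             final_result.update({key: final_value})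
--
--     for key in sapienz_result.keys():
--         if key in final_result.keys():
--             continue
--         else:
--             if key in monkey_result.keys():
--                 final_value = monkey_result[key] + "@" + sapienz_result[key]
--             else:
--                 final_value = " @" + sapienz_result[key]
--             if key in stoat_result.keys():
--                 final_value = final_value + "@" + stoat_result[key]
--             else:
--                 final_value = final_value + "@ "
--             final_result.update({key: final_value})
--
--     for key in stoat_result.keys():
--         if key in final_result.keys():
--             continue
--         else:
--             if key in monkey_result.keys():
--                 final_value = monkey_result[key] + "@"
--             else:
--                 final_value = " @"
--             if key in sapienz_result.keys():
--                 final_value = final_value + sapienz_result[key] + "@" + stoat_result[key]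
--             else:
--                 final_value = final_value + " @" + stoat_result[key]
--             final_result.update({key: final_value})
--
--     # SQtesting
--     for key in final_result.keys():
--         if key in SQtesting_result.keys():
--             final_result[key] = final_result[key] + "@" + SQtesting_result[key]
--         else:
--             final_result[key] = final_result[key] + "@ "
--
--     # SQtesting2
--     for key in final_result.keys():
--         if key in SQtesting2_result.keys():
--             final_result[key] = final_result[key] + "@" + SQtesting2_result[key]
--         else:
--             final_result[key] = final_result[key] + "@ "
--     return final_result
-- ===== SOURCE B (Python) =====
-- def getFinalResult(monkey_result, sapienz_result, stoat_result, SQtesting_result, SQtesting2_result):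
--     dicts = (monkey_result, sapienz_result, stoat_result, SQtesting_result, SQtesting2_result)
--     final_result = {}
--     for key in list(monkey_result) + list(sapienz_result) + list(stoat_result):
--         if key not in final_result:
--             final_result[key] = "@".join(d.get(key, " ") for d in dicts)
--     return final_result
-- ===== Notes on version B (the rewrite author's own statement) =====
-- stated objective: simpler
-- what changed: Replaces A's three phased key loops with nested presence branches plus two value-append loops by a single pass over the concatenated key lists that builds each value at once with '@'.join over get(key, ' ') of all five dicts.
import Mathlib
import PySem

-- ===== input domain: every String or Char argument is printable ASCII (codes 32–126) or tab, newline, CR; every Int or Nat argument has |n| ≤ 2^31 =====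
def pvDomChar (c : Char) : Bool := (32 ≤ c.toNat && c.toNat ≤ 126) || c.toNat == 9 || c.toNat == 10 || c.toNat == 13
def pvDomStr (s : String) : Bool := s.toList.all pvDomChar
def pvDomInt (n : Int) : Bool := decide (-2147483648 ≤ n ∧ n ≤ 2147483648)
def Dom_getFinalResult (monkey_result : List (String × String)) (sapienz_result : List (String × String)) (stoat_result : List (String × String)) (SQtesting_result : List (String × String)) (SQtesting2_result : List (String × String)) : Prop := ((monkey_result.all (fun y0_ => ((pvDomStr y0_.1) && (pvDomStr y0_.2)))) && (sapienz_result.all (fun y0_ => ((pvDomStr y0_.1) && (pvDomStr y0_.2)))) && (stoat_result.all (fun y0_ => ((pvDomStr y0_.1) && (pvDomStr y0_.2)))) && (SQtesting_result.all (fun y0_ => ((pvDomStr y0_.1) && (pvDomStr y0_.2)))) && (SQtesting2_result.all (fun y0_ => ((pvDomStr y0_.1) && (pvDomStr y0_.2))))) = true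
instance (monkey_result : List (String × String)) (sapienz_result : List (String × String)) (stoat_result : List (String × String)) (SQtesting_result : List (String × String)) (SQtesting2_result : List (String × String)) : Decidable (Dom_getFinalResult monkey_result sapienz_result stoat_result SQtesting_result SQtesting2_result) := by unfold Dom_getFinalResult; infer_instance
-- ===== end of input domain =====

-- B replaces A's three phased key loops (with nested presence branches) and two value-append
-- loops by one pass over the concatenated key lists building each value with '@'.join (simpler).


-- ===== PORT A =====
-- A-side helpers: the named bodies of A's five loops, transliterated branch for branch
-- loop 1: 'for key in monkey_result.keys(): …'
def pvLoopM (m s st : PySem.Dict String String) (fr : PySem.Dict String String) (key : String) : PySem.Dict String String :=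
  if fr.contains key then fr
  else
    let v1 := if s.contains key then m.getD key "" ++ "@" ++ s.getD key "" else m.getD key "" ++ "@ "
    let v2 := if st.contains key then v1 ++ "@" ++ st.getD key "" else v1 ++ "@ "
    fr.insert key v2

-- loop 2: 'for key in sapienz_result.keys(): …'
def pvLoopS (m s st : PySem.Dict String String) (fr : PySem.Dict String String) (key : String) : PySem.Dict String String :=
  if fr.contains key then fr
  else
    let v1 := if m.contains key then m.getD key "" ++ "@" ++ s.getD key "" else " @" ++ s.getD key ""
    let v2 := if st.contains key then v1 ++ "@" ++ st.getD key "" else v1 ++ "@ "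
    fr.insert key v2

-- loop 3: 'for key in stoat_result.keys(): …'
def pvLoopST (m s st : PySem.Dict String String) (fr : PySem.Dict String String) (key : String) : PySem.Dict String String :=
  if fr.contains key then fr
  else
    let v1 := if m.contains key then m.getD key "" ++ "@" else " @"
    let v2 := if s.contains key then v1 ++ s.getD key "" ++ "@" ++ st.getD key "" else v1 ++ " @" ++ st.getD key ""
    fr.insert key v2

-- loops 4/5: 'for key in final_result.keys(): final_result[key] = final_result[key] + …'
def pvLoopQ (q : PySem.Dict String String) (fr : PySem.Dict String String) (key : String) : PySem.Dict String String :=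
  if q.contains key then fr.insert key (fr.getD key "" ++ "@" ++ q.getD key "")
  else fr.insert key (fr.getD key "" ++ "@ ")

def getFinalResult (monkey_result : List (String × String)) (sapienz_result : List (String × String)) (stoat_result : List (String × String)) (SQtesting_result : List (String × String)) (SQtesting2_result : List (String × String)) : List (String × String) :=
  let m := PySem.Dict.ofList monkey_result
  let s := PySem.Dict.ofList sapienz_result
  let st := PySem.Dict.ofList stoat_result
  let q1 := PySem.Dict.ofList SQtesting_result
  let q2 := PySem.Dict.ofList SQtesting2_result
  let fr1 := m.keys.foldl (pvLoopM m s st) PySem.Dict.empty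
  let fr2 := s.keys.foldl (pvLoopS m s st) fr1
  let fr3 := st.keys.foldl (pvLoopST m s st) fr2
  let fr4 := fr3.keys.foldl (pvLoopQ q1) fr3
  let fr5 := fr4.keys.foldl (pvLoopQ q2) fr4
  fr5.items

-- ===== PORT B =====
-- B-side helpers: "@".join(d.get(key, " ") for d in dicts), and the body of B's single loop
def pvJoinVal (dicts : List (PySem.Dict String String)) (key : String) : String :=
  PySem.Str.join "@" (dicts.map (fun d => d.getD key " "))

def pvAltLoop (dicts : List (PySem.Dict String String)) (fr : PySem.Dict String String) (key : String) : PySem.Dict String String :=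
  if fr.contains key then fr else fr.insert key (pvJoinVal dicts key)

def getFinalResult_alt (monkey_result : List (String × String)) (sapienz_result : List (String × String)) (stoat_result : List (String × String)) (SQtesting_result : List (String × String)) (SQtesting2_result : List (String × String)) : List (String × String) :=
  let m := PySem.Dict.ofList monkey_result
  let s := PySem.Dict.ofList sapienz_result
  let st := PySem.Dict.ofList stoat_result
  let q1 := PySem.Dict.ofList SQtesting_result
  let q2 := PySem.Dict.ofList SQtesting2_result
  let dicts := [m, s, st, q1, q2]
  ((m.keys ++ s.keys ++ st.keys).foldl (pvAltLoop dicts) PySem.Dict.empty).items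

-- ===== PRECONDITION & SPEC =====
def Spec_getFinalResult (monkey_result : List (String × String)) (sapienz_result : List (String × String)) (stoat_result : List (String × String)) (SQtesting_result : List (String × String)) (SQtesting2_result : List (String × String)) (out : List (String × String)) : Prop := out = getFinalResult_alt monkey_result sapienz_result stoat_result SQtesting_result SQtesting2_result
instance (monkey_result : List (String × String)) (sapienz_result : List (String × String)) (stoat_result : List (String × String)) (SQtesting_result : List (String × String)) (SQtesting2_result : List (String × String)) (out : List (String × String)) : Decidable (Spec_getFinalResult monkey_result sapienz_result stoat_result SQtesting_result SQtesting2_result out) := by unfold Spec_getFinalResult; infer_instance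

-- ===== CLAIM (what is proved, stated in full; the proofs are below) =====
def Claim_equal_getFinalResult : Prop := ∀ (monkey_result : List (String × String)) (sapienz_result : List (String × String)) (stoat_result : List (String × String)) (SQtesting_result : List (String × String)) (SQtesting2_result : List (String × String)), Dom_getFinalResult monkey_result sapienz_result stoat_result SQtesting_result SQtesting2_result → Spec_getFinalResult monkey_result sapienz_result stoat_result SQtesting_result SQtesting2_result (getFinalResult monkey_result sapienz_result stoat_result SQtesting_result SQtesting2_result)

-- ===== LEMMAS AND PROOFS =====

-- first occurrences of L not in seen (the keys a guarded-insert loop adds, in order)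
def pvFresh : List String → List String → List String
  | [], _ => []
  | k :: r, seen => if k ∈ seen then pvFresh r seen else k :: pvFresh r (k :: seen)

-- the common shape of A's first three loops and B's loop: skip present key, else insert g key
def pvGuard (g : String → String) (fr : PySem.Dict String String) (k : String) : PySem.Dict String String :=
  if fr.contains k then fr else fr.insert k (g k)

-- the canonical value after A's first three loops
def pvW3 (m s st : PySem.Dict String String) (k : String) : String :=
  m.getD k " " ++ "@" ++ s.getD k " " ++ "@" ++ st.getD k " "

-- the value transformer of A's loops 4/5
def pvSuf (q : PySem.Dict String String) (k : String) (v : String) : String :=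
  if q.contains k then v ++ "@" ++ q.getD k "" else v ++ "@ "

theorem pvFresh_congr (L : List String) (s₁ s₂ : List String)
    (h : ∀ x, x ∈ s₁ ↔ x ∈ s₂) : pvFresh L s₁ = pvFresh L s₂ := by
  induction L generalizing s₁ s₂ with
  | nil => rfl
  | cons k r ih =>
      simp only [pvFresh]
      by_cases hk : k ∈ s₁
      · rw [if_pos hk, if_pos ((h k).mp hk)]; exact ih _ _ h
      · rw [if_neg hk, if_neg (fun c => hk ((h k).mpr c))]
        exact congrArg (k :: ·) (ih _ _ (by intro x; simp [h x]))

theorem pvFresh_sub (L : List String) (seen : List String) :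
    ∀ k ∈ pvFresh L seen, k ∈ L ∧ k ∉ seen := by
  induction L generalizing seen with
  | nil => simp [pvFresh]
  | cons a r ih =>
      intro k hk
      simp only [pvFresh] at hk
      by_cases ha : a ∈ seen
      · rw [if_pos ha] at hk
        have := ih seen k hk; exact ⟨by simp [this.1], this.2⟩
      · rw [if_neg ha] at hk
        rcases List.mem_cons.mp hk with h | h
        · exact ⟨by simp [h], h ▸ ha⟩
        · have := ih (a :: seen) k h
          exact ⟨by simp [this.1], fun c => this.2 (by simp [c])⟩

theorem pvFresh_nodup (L : List String) (seen : List String) : (pvFresh L seen).Nodup := by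
  induction L generalizing seen with
  | nil => simp [pvFresh]
  | cons a r ih =>
      simp only [pvFresh]
      by_cases ha : a ∈ seen
      · rw [if_pos ha]; exact ih seen
      · rw [if_neg ha]
        refine List.nodup_cons.mpr ⟨fun c => ?_, ih (a :: seen)⟩
        exact (pvFresh_sub r (a :: seen) a c).2 (by simp)

theorem pvGuard_items (L : List String) (g : String → String) (d : PySem.Dict String String)
    (hd : d.keys.Nodup) :
    (L.foldl (pvGuard g) d).items = d.items ++ (pvFresh L d.keys).map (fun k => (k, g k)) := by
  induction L generalizing d with
  | nil => simp [pvFresh]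
  | cons k r ih =>
      simp only [List.foldl_cons, pvFresh]
      by_cases hk : k ∈ d.keys
      · rw [if_pos hk]
        have hc : d.contains k = true := (PySem.Dict.contains_iff_mem_keys d k).mpr hk
        simp only [pvGuard, hc, ite_true]
        exact ih d hd
      · have hc : d.contains k = false := by
          rcases Bool.eq_false_or_eq_true (d.contains k) with h | h
          · exact absurd ((PySem.Dict.contains_iff_mem_keys d k).mp h) hk
          · exact h
        rw [if_neg hk]
        simp only [pvGuard, hc]
        rw [if_neg (by simp)]
        have hkeys := PySem.Dict.keys_insert_of_not_contains d (g k) hc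
        have hnd : (d.insert k (g k)).keys.Nodup :=
          PySem.Dict.nodup_keys_insert d k (g k) hd
        rw [ih (d.insert k (g k)) hnd, PySem.Dict.items_insert_of_not_contains d (g k) hc]
        rw [pvFresh_congr r (d.insert k (g k)).keys (k :: d.keys) (by intro x; rw [hkeys]; simp; tauto)]
        simp

theorem pvStage (K : List String) (f : String → String → String) (d : PySem.Dict String String)
    (hK : K.Nodup) (hd : d.keys.Nodup) (hKd : ∀ k ∈ K, d.contains k = true) :
    (K.foldl (fun fr k => fr.insert k (f k (fr.getD k ""))) d).items
      = d.items.map (fun p => if p.1 ∈ K then (p.1, f p.1 p.2) else p) := by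
  induction K generalizing d with
  | nil => simp
  | cons k K' ih =>
      simp only [List.foldl_cons]
      have hck : d.contains k = true := hKd k (by simp)
      have hnd' : (d.insert k (f k (d.getD k ""))).keys.Nodup :=
        PySem.Dict.nodup_keys_insert _ _ _ hd
      have hKd' : ∀ x ∈ K', (d.insert k (f k (d.getD k ""))).contains x = true := by
        intro x hx
        rw [PySem.Dict.contains_insert]
        simp [hKd x (by simp [hx])]
      rw [ih _ (List.nodup_cons.mp hK).2 hnd' hKd',
          PySem.Dict.items_insert_of_contains d _ hck, List.map_map]
      apply List.map_congr_left
      intro p hp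
      have hval : ∀ d0 : String, d.getD p.1 d0 = p.2 := fun d0 =>
        PySem.Dict.getD_of_mem_items d (by exact hp) hd d0
      by_cases h1 : p.1 = k
      · have hkK' : k ∉ K' := (List.nodup_cons.mp hK).1
        subst h1
        simp [Function.comp, hkK', hval ""]
      · have : (p.1 == k) = false := by simp [h1]
        simp only [Function.comp, this]
        by_cases h2 : p.1 ∈ K' <;> simp [h1, h2]

theorem pvStage_keys (K : List String) (f : String → String → String) (d : PySem.Dict String String)
    (hK : K.Nodup) (hd : d.keys.Nodup) (hKd : ∀ k ∈ K, d.contains k = true) :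
    (K.foldl (fun fr k => fr.insert k (f k (fr.getD k ""))) d).keys = d.keys := by
  simp only [PySem.Dict.keys, pvStage K f d hK hd hKd, List.map_map]
  apply List.map_congr_left
  intro p _
  by_cases h : p.1 ∈ K <;> simp [h]

-- getD's default is irrelevant on a present key
theorem pvGetD_irrel (d : PySem.Dict String String) (k : String) (h : d.contains k = true)
    (a b : String) : d.getD k a = d.getD k b := by
  rw [PySem.Dict.getD_eq_get?_getD, PySem.Dict.getD_eq_get?_getD]
  rw [PySem.Dict.contains_eq_isSome_get?] at h
  cases hg : d.get? k with
  | none => rw [hg] at h; simp at h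
  | some v => simp

theorem pvNotContains (d : PySem.Dict String String) (k : String) (h : ¬ d.contains k = true) :
    d.contains k = false := by
  rcases Bool.eq_false_or_eq_true (d.contains k) with h' | h'
  · exact absurd h' h
  · exact h'

theorem pvAppSp (x : String) : x ++ "@ " = x ++ "@" ++ " " := by
  rw [String.append_assoc, show ("@" : String) ++ " " = "@ " from by decide]

theorem pvAppSpAt (x : String) : x ++ " @" = x ++ " " ++ "@" := by
  rw [String.append_assoc, show (" " : String) ++ "@" = " @" from by decide]

theorem pvJoin5 (a b c d e : String) :
    PySem.Str.join "@" [a, b, c, d, e] = a ++ "@" ++ b ++ "@" ++ c ++ "@" ++ d ++ "@" ++ e := by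
  apply String.toList_inj.mp
  simp [PySem.Str.toList_join, PySem.Chars.join, List.intercalate, String.toList_append,
    List.intersperse]

-- A's loop-1 body computes pvW3 on keys of m
theorem pvLoopM_eq (m s st : PySem.Dict String String) :
    ∀ (fr : PySem.Dict String String), ∀ k ∈ m.keys, pvLoopM m s st fr k = pvGuard (pvW3 m s st) fr k := by
  intro fr k hk
  have hm : m.contains k = true := (PySem.Dict.contains_iff_mem_keys m k).mpr hk
  unfold pvLoopM pvGuard pvW3
  by_cases hfr : fr.contains k = true
  · simp [hfr]
  · simp only [hfr, Bool.false_eq_true, ite_false]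
    congr 1
    by_cases hs : s.contains k = true <;> by_cases hst : st.contains k = true
    · simp only [hs, hst, ite_true]
      rw [pvGetD_irrel m k hm "" " ", pvGetD_irrel s k hs "" " ", pvGetD_irrel st k hst "" " "]
    · simp only [hs, hst, ite_true, Bool.false_eq_true, ite_false]
      rw [pvGetD_irrel m k hm "" " ", pvGetD_irrel s k hs "" " ",
          PySem.Dict.getD_of_not_contains st " " (pvNotContains st k hst), pvAppSp]
    · simp only [hs, hst, ite_true, Bool.false_eq_true, ite_false]
      rw [pvGetD_irrel m k hm "" " ", pvGetD_irrel st k hst "" " ",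
          PySem.Dict.getD_of_not_contains s " " (pvNotContains s k hs), pvAppSp]
    · simp only [hs, hst, Bool.false_eq_true, ite_false]
      rw [pvGetD_irrel m k hm "" " ",
          PySem.Dict.getD_of_not_contains s " " (pvNotContains s k hs),
          PySem.Dict.getD_of_not_contains st " " (pvNotContains st k hst), pvAppSp, pvAppSp]

-- A's loop-2 body computes pvW3 on keys of s
theorem pvLoopS_eq (m s st : PySem.Dict String String) :
    ∀ (fr : PySem.Dict String String), ∀ k ∈ s.keys, pvLoopS m s st fr k = pvGuard (pvW3 m s st) fr k := by
  intro fr k hk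
  have hs : s.contains k = true := (PySem.Dict.contains_iff_mem_keys s k).mpr hk
  unfold pvLoopS pvGuard pvW3
  by_cases hfr : fr.contains k = true
  · simp [hfr]
  · simp only [hfr, Bool.false_eq_true, ite_false]
    congr 1
    by_cases hm : m.contains k = true <;> by_cases hst : st.contains k = true
    · simp only [hm, hst, ite_true]
      rw [pvGetD_irrel m k hm "" " ", pvGetD_irrel s k hs "" " ", pvGetD_irrel st k hst "" " "]
    · simp only [hm, hst, ite_true, Bool.false_eq_true, ite_false]
      rw [pvGetD_irrel m k hm "" " ", pvGetD_irrel s k hs "" " ",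
          PySem.Dict.getD_of_not_contains st " " (pvNotContains st k hst), pvAppSp]
    · simp only [hm, hst, ite_true, Bool.false_eq_true, ite_false]
      rw [pvGetD_irrel s k hs "" " ", pvGetD_irrel st k hst "" " ",
          PySem.Dict.getD_of_not_contains m " " (pvNotContains m k hm),
          show (" @" : String) = " " ++ "@" from by decide]
    · simp only [hm, hst, Bool.false_eq_true, ite_false]
      rw [pvGetD_irrel s k hs "" " ",
          PySem.Dict.getD_of_not_contains m " " (pvNotContains m k hm),
          PySem.Dict.getD_of_not_contains st " " (pvNotContains st k hst),
          show (" @" : String) = " " ++ "@" from by decide, pvAppSp]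

-- A's loop-3 body computes pvW3 on keys of st
theorem pvLoopST_eq (m s st : PySem.Dict String String) :
    ∀ (fr : PySem.Dict String String), ∀ k ∈ st.keys, pvLoopST m s st fr k = pvGuard (pvW3 m s st) fr k := by
  intro fr k hk
  have hst : st.contains k = true := (PySem.Dict.contains_iff_mem_keys st k).mpr hk
  unfold pvLoopST pvGuard pvW3
  by_cases hfr : fr.contains k = true
  · simp [hfr]
  · simp only [hfr, Bool.false_eq_true, ite_false]
    congr 1
    by_cases hm : m.contains k = true <;> by_cases hs : s.contains k = true
    · simp only [hm, hs, ite_true]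
      rw [pvGetD_irrel m k hm "" " ", pvGetD_irrel s k hs "" " ", pvGetD_irrel st k hst "" " "]
    · simp only [hm, hs, ite_true, Bool.false_eq_true, ite_false]
      rw [pvGetD_irrel m k hm "" " ", pvGetD_irrel st k hst "" " ",
          PySem.Dict.getD_of_not_contains s " " (pvNotContains s k hs), pvAppSpAt]
    · simp only [hm, hs, ite_true, Bool.false_eq_true, ite_false]
      rw [pvGetD_irrel s k hs "" " ", pvGetD_irrel st k hst "" " ",
          PySem.Dict.getD_of_not_contains m " " (pvNotContains m k hm),
          show (" @" : String) = " " ++ "@" from by decide]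
    · simp only [hm, hs, Bool.false_eq_true, ite_false]
      rw [pvGetD_irrel st k hst "" " ",
          PySem.Dict.getD_of_not_contains m " " (pvNotContains m k hm),
          PySem.Dict.getD_of_not_contains s " " (pvNotContains s k hs),
          show (" @" : String) = " " ++ "@" from by decide, ← String.append_assoc]

-- A's loops 4/5 are value updates
theorem pvLoopQ_eq (q : PySem.Dict String String) :
    pvLoopQ q = fun fr k => fr.insert k (pvSuf q k (fr.getD k "")) := by
  funext fr k
  unfold pvLoopQ pvSuf
  by_cases h : q.contains k = true <;> simp [h]

-- the combined value equality: A's suffix chain equals B's five-way join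
theorem pvVal_eq (m s st q1 q2 : PySem.Dict String String) (k : String) :
    pvSuf q2 k (pvSuf q1 k (pvW3 m s st k)) = pvJoinVal [m, s, st, q1, q2] k := by
  unfold pvJoinVal
  simp only [List.map]
  rw [pvJoin5]
  unfold pvSuf pvW3
  by_cases h1 : q1.contains k = true <;> by_cases h2 : q2.contains k = true
  · simp only [h1, h2, ite_true]
    rw [pvGetD_irrel q1 k h1 "" " ", pvGetD_irrel q2 k h2 "" " "]
  · simp only [h1, h2, ite_true, Bool.false_eq_true, ite_false]
    rw [pvGetD_irrel q1 k h1 "" " ",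
        PySem.Dict.getD_of_not_contains q2 " " (pvNotContains q2 k h2), pvAppSp]
  · simp only [h1, h2, ite_true, Bool.false_eq_true, ite_false]
    rw [pvGetD_irrel q2 k h2 "" " ",
        PySem.Dict.getD_of_not_contains q1 " " (pvNotContains q1 k h1), pvAppSp]
  · simp only [h1, h2, Bool.false_eq_true, ite_false]
    rw [PySem.Dict.getD_of_not_contains q1 " " (pvNotContains q1 k h1),
        PySem.Dict.getD_of_not_contains q2 " " (pvNotContains q2 k h2), pvAppSp, pvAppSp]

theorem getFinalResult_spec_aux (monkey_result sapienz_result stoat_result SQtesting_result SQtesting2_result : List (String × String)) :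
    getFinalResult monkey_result sapienz_result stoat_result SQtesting_result SQtesting2_result
      = getFinalResult_alt monkey_result sapienz_result stoat_result SQtesting_result SQtesting2_result := by
  simp only [getFinalResult, getFinalResult_alt]
  set m := PySem.Dict.ofList monkey_result with hm
  set s := PySem.Dict.ofList sapienz_result with hs
  set st := PySem.Dict.ofList stoat_result with hst
  set q1 := PySem.Dict.ofList SQtesting_result with hq1
  set q2 := PySem.Dict.ofList SQtesting2_result with hq2
  rw [PySem.List.foldl_congr_mem m.keys (pvLoopM m s st) (pvGuard (pvW3 m s st))
        PySem.Dict.empty (pvLoopM_eq m s st),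
      PySem.List.foldl_congr_mem s.keys (pvLoopS m s st) (pvGuard (pvW3 m s st))
        _ (pvLoopS_eq m s st),
      PySem.List.foldl_congr_mem st.keys (pvLoopST m s st) (pvGuard (pvW3 m s st))
        _ (pvLoopST_eq m s st),
      ← List.foldl_append, ← List.foldl_append, ← List.append_assoc]
  set L := m.keys ++ s.keys ++ st.keys with hL
  set F := pvFresh L [] with hF
  have hemp : (PySem.Dict.empty : PySem.Dict String String).keys.Nodup := by decide
  have hitems3 : (L.foldl (pvGuard (pvW3 m s st)) PySem.Dict.empty).items
      = F.map (fun k => (k, pvW3 m s st k)) := by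
    rw [pvGuard_items L (pvW3 m s st) PySem.Dict.empty hemp]
    rw [show (PySem.Dict.empty : PySem.Dict String String).keys = [] from rfl]
    rw [show (PySem.Dict.empty : PySem.Dict String String).items = [] from rfl]
    exact List.nil_append _
  have hkeys3 : (L.foldl (pvGuard (pvW3 m s st)) PySem.Dict.empty).keys = F := by
    simp only [PySem.Dict.keys, hitems3, List.map_map]
    exact List.map_id F
  set fr3 := L.foldl (pvGuard (pvW3 m s st)) PySem.Dict.empty with hfr3
  have hFnd : F.Nodup := hF ▸ pvFresh_nodup L []
  have hnd3 : fr3.keys.Nodup := hkeys3 ▸ hFnd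
  have hcont3 : ∀ k ∈ fr3.keys, fr3.contains k = true := fun k hk =>
    (PySem.Dict.contains_iff_mem_keys fr3 k).mpr hk
  rw [pvLoopQ_eq q1, pvLoopQ_eq q2]
  have h4i := pvStage fr3.keys (pvSuf q1) fr3 hnd3 hnd3 hcont3
  have h4k := pvStage_keys fr3.keys (pvSuf q1) fr3 hnd3 hnd3 hcont3
  set fr4 := fr3.keys.foldl (fun fr k => fr.insert k (pvSuf q1 k (fr.getD k ""))) fr3 with hfr4
  have hnd4 : fr4.keys.Nodup := h4k ▸ hnd3
  have hcont4 : ∀ k ∈ fr4.keys, fr4.contains k = true := fun k hk =>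
    (PySem.Dict.contains_iff_mem_keys fr4 k).mpr hk
  have h5i := pvStage fr4.keys (pvSuf q2) fr4 hnd4 hnd4 hcont4
  rw [h5i, h4i, hitems3, h4k, hkeys3, List.map_map, List.map_map]
  rw [show pvAltLoop [m, s, st, q1, q2] = pvGuard (pvJoinVal [m, s, st, q1, q2]) from rfl]
  rw [pvGuard_items L (pvJoinVal [m, s, st, q1, q2]) PySem.Dict.empty hemp]
  rw [show (PySem.Dict.empty : PySem.Dict String String).keys = [] from rfl]
  rw [show (PySem.Dict.empty : PySem.Dict String String).items = [] from rfl]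
  rw [List.nil_append, ← hF]
  apply List.map_congr_left
  intro k hk
  simp only [Function.comp]
  simp only [hk, ite_true]
  rw [pvVal_eq m s st q1 q2 k]

-- ===== VERDICT (by name: the statement is the Claim_ definition above) =====
theorem getFinalResult_spec : Claim_equal_getFinalResult := by
  intro m s st q1 q2 _
  exact getFinalResult_spec_aux m s st q1 q2
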